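-- pv_equiv track=rewrite | github.com/ricfila/fm-backend | backend/utils/categories.py | collapseChangesChains
-- ===== SOURCE A (Python) =====
-- def collapseChangesChains(changes):
--     resolved_changes = {}
--
--     for from_id in changes:
--         current_to = changes[from_id]
--
--         while current_to in changes:
--             current_to = changes[current_to]
--
--         resolved_changes[from_id] = current_to
--
--     return {k: v for k, v in resolved_changes.items() if k != v}
-- ===== SOURCE B (Python) =====
-- def collapseChangesChains(changes):
--     # Single memoized pass with path compression: each node's terminal target is
--     # computed once and reused for every chain that passes through it.
--     memo = {}
--     result = {}
--     for k in changes: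
--         x = k
--         path = []
--         while x in changes and x not in memo:
--             path.append(x)
--             x = changes[x]
--         end = memo[x] if x in memo else x
--         for p in path:
--             memo[p] = end
--         if k != end:
--             result[k] = end
--     return result
-- ===== Notes on version B (the rewrite author's own statement) =====
-- stated objective: alternative
-- what changed: B resolves all chains in one pass with a memo dict and path compression (each node's terminal target is computed once and reused), instead of A's re-chasing the whole chain from scratch for every key.
import Mathlib
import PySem

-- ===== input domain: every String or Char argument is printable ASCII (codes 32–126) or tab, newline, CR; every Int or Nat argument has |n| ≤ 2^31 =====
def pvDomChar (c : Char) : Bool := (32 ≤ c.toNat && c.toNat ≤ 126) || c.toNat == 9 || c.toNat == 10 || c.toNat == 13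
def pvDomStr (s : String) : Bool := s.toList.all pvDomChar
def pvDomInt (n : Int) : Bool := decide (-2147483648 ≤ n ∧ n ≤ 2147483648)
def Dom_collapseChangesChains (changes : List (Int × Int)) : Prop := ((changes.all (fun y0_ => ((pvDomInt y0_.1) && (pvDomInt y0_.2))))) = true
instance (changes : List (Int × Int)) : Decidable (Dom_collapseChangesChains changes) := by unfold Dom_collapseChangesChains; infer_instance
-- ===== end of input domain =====

-- B replaces A's per-key re-chasing of chains by a single memoized (path-compressed) pass; equality proved on acyclic mappings (Pre_), where A's while loop terminates.


-- ===== PORT A =====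
-- A's 'while current_to in changes' loop, fueled: on Pre_ inputs fuel changes.length suffices,
-- so the fuel branch is never the returned value there (exhaustion just returns the current value).
def pvWhileA (d : PySem.Dict Int Int) : Nat → Int → Int
  | 0, x => x
  | n+1, x => if d.contains x then pvWhileA d n (d.getD x x) else x

def collapseChangesChains (changes : List (Int × Int)) : List (Int × Int) :=
  let d := PySem.Dict.ofList changes
  let resolved := d.keys.foldl
    (fun r k => r.insert k (pvWhileA d changes.length (d.getD k k))) PySem.Dict.empty
  resolved.items.filter (fun p => p.1 != p.2)

-- ===== PORT B =====
-- B's inner 'while x in changes and x not in memo' loop, fueled likewise.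
def pvResolveLoop (d memo : PySem.Dict Int Int) : Nat → Int → List Int → Int × List Int
  | 0, x, path => (x, path)
  | n+1, x, path =>
    if d.contains x && !(memo.contains x) then
      pvResolveLoop d memo n (d.getD x x) (path ++ [x])
    else (x, path)

-- one iteration of B's outer loop: resolve k, path-compress into memo, append the kept pair
-- (result keys are fresh, so the Python dict insert is an append of its item).
def pvAltStep (d : PySem.Dict Int Int) (L : Nat)
    (st : PySem.Dict Int Int × List (Int × Int)) (k : Int) :
    PySem.Dict Int Int × List (Int × Int) :=
  let r := pvResolveLoop d st.1 (L + 1) k []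
  let e := st.1.getD r.1 r.1
  (r.2.foldl (fun m p => m.insert p e) st.1,
   if k != e then st.2 ++ [(k, e)] else st.2)

def collapseChangesChains_alt (changes : List (Int × Int)) : List (Int × Int) :=
  let d := PySem.Dict.ofList changes
  (d.keys.foldl (pvAltStep d changes.length) (PySem.Dict.empty, [])).2

-- ===== PRECONDITION & SPEC =====
def pvStep (d : PySem.Dict Int Int) (x : Int) : Int := d.getD x x

-- Pre_ excludes exactly the mappings that contain a cycle (a chain that never leaves the key
-- set): on those Python A's while loop never terminates, so A returns no value there.
def Pre_collapseChangesChains (changes : List (Int × Int)) : Prop :=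
  ∀ k ∈ (PySem.Dict.ofList changes).keys,
    (pvStep (PySem.Dict.ofList changes))^[changes.length] k ∉ (PySem.Dict.ofList changes).keys

instance (changes : List (Int × Int)) : Decidable (Pre_collapseChangesChains changes) := by
  unfold Pre_collapseChangesChains; infer_instance

def pvWitness_collapseChangesChains : (List (Int × Int)) := [(1, 2), (2, 3)]

def Spec_collapseChangesChains (changes : List (Int × Int)) (out : List (Int × Int)) : Prop := out = collapseChangesChains_alt changes
instance (changes : List (Int × Int)) (out : List (Int × Int)) : Decidable (Spec_collapseChangesChains changes out) := by unfold Spec_collapseChangesChains; infer_instance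

-- ===== CLAIM (what is proved, stated in full; the proofs are below) =====
def Claim_equal_collapseChangesChains : Prop := ∀ (changes : List (Int × Int)), Dom_collapseChangesChains changes → Pre_collapseChangesChains changes → Spec_collapseChangesChains changes (collapseChangesChains changes)

-- ===== LEMMAS AND PROOFS =====

theorem pvStep_of_not_mem (d : PySem.Dict Int Int) (x : Int) (h : x ∉ d.keys) :
    pvStep d x = x := by
  unfold pvStep
  apply PySem.Dict.getD_of_not_contains
  simp [PySem.Dict.contains_eq_decide_mem_keys, h]

theorem pvIter_of_not_mem (d : PySem.Dict Int Int) (n : Nat) (x : Int) (h : x ∉ d.keys) :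
    (pvStep d)^[n] x = x :=
  Function.iterate_fixed (pvStep_of_not_mem d x h) n

-- under Pre_ every chase lands outside the key set after L steps
theorem pvIter_not_mem (d : PySem.Dict Int Int) (L : Nat)
    (hPre : ∀ k ∈ d.keys, (pvStep d)^[L] k ∉ d.keys) (x : Int) :
    (pvStep d)^[L] x ∉ d.keys := by
  by_cases hx : x ∈ d.keys
  · exact hPre x hx
  · rw [pvIter_of_not_mem d L x hx]; exact hx

theorem pvIter_step (d : PySem.Dict Int Int) (L : Nat)
    (hPre : ∀ k ∈ d.keys, (pvStep d)^[L] k ∉ d.keys) (x : Int) :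
    (pvStep d)^[L] (pvStep d x) = (pvStep d)^[L] x := by
  have h1 : (pvStep d)^[L] (pvStep d x) = (pvStep d)^[L + 1] x := by
    rw [Function.iterate_succ_apply]
  rw [h1, Function.iterate_succ_apply']
  exact pvStep_of_not_mem d _ (pvIter_not_mem d L hPre x)

theorem pvWhileA_eq_iter (d : PySem.Dict Int Int) :
    ∀ (f : Nat) (x : Int), pvWhileA d f x = (pvStep d)^[f] x := by
  intro f
  induction f with
  | zero => intro x; rfl
  | succ n ih =>
    intro x
    by_cases hc : d.contains x = true
    · rw [pvWhileA, if_pos hc, ih, Function.iterate_succ_apply]; rfl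
    · rw [pvWhileA, if_neg hc]
      have hx : x ∉ d.keys := by
        simp [PySem.Dict.contains_eq_decide_mem_keys] at hc; exact hc
      rw [pvIter_of_not_mem d _ x hx]

-- memo invariant: every memoized value is the terminal of its key
def pvInv (d : PySem.Dict Int Int) (L : Nat) (m : PySem.Dict Int Int) : Prop :=
  ∀ p v, m.get? p = some v → v = (pvStep d)^[L] p

theorem pvResolveLoop_spec (d m : PySem.Dict Int Int) (L : Nat)
    (hnm : ∀ x, (pvStep d)^[L] x ∉ d.keys) :
    ∀ (f : Nat) (x : Int) (path : List Int), (pvStep d)^[f] x ∉ d.keys →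
      (d.contains (pvResolveLoop d m f x path).1
        && !(m.contains (pvResolveLoop d m f x path).1)) = false
      ∧ (pvStep d)^[L] (pvResolveLoop d m f x path).1 = (pvStep d)^[L] x
      ∧ ∀ p ∈ (pvResolveLoop d m f x path).2,
          p ∈ path ∨ (pvStep d)^[L] p = (pvStep d)^[L] x := by
  intro f
  induction f with
  | zero =>
    intro x path hout
    have hc : d.contains x = false := by
      simp [PySem.Dict.contains_eq_decide_mem_keys]
      simpa using hout
    refine ⟨?_, rfl, fun p hp => Or.inl hp⟩
    simp [pvResolveLoop, hc]
  | succ n ih =>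
    intro x path hout
    by_cases hc : (d.contains x && !(m.contains x)) = true
    · have hrec : pvResolveLoop d m (n+1) x path
          = pvResolveLoop d m n (d.getD x x) (path ++ [x]) := by
        rw [pvResolveLoop, if_pos hc]
      have hout' : (pvStep d)^[n] (d.getD x x) ∉ d.keys := by
        rw [show d.getD x x = pvStep d x from rfl, ← Function.iterate_succ_apply]
        exact hout
      obtain ⟨h1, h2, h3⟩ := ih (d.getD x x) (path ++ [x]) hout'
      have hstep : (pvStep d)^[L] (d.getD x x) = (pvStep d)^[L] x :=
        pvIter_step d L (fun k _ => hnm k) x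
      rw [hrec]
      refine ⟨h1, by rw [h2, hstep], ?_⟩
      intro p hp
      rcases h3 p hp with h | h
      · rcases List.mem_append.1 h with h' | h'
        · exact Or.inl h'
        · right
          have : p = x := by simpa using h'
          rw [this]
      · exact Or.inr (by rw [h, hstep])
    · have hrec : pvResolveLoop d m (n+1) x path = (x, path) := by
        rw [pvResolveLoop, if_neg hc]
      rw [hrec]
      exact ⟨by simpa using hc, rfl, fun p hp => Or.inl hp⟩

theorem pvInv_foldl (d : PySem.Dict Int Int) (L : Nat) (e : Int) :
    ∀ (ps : List Int) (m : PySem.Dict Int Int), pvInv d L m →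
      (∀ p ∈ ps, (pvStep d)^[L] p = e) →
      pvInv d L (ps.foldl (fun m p => m.insert p e) m) := by
  intro ps
  induction ps with
  | nil => intro m hm _; exact hm
  | cons p ps ih =>
    intro m hm hps
    simp only [List.foldl_cons]
    apply ih
    · intro q v hq
      rw [PySem.Dict.get?_insert] at hq
      split_ifs at hq with hqp
      · cases hq
        rw [hqp]
        exact (hps p (List.mem_cons_self)).symm
      · exact hm q v hq
    · intro q hq; exact hps q (List.mem_cons_of_mem p hq)

theorem pvFold_spec (d : PySem.Dict Int Int) (L : Nat)
    (hnm : ∀ x, (pvStep d)^[L] x ∉ d.keys) :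
    ∀ (ks : List Int) (m : PySem.Dict Int Int) (acc : List (Int × Int)), pvInv d L m →
      (ks.foldl (pvAltStep d L) (m, acc)).2
        = acc ++ (ks.map (fun k => (k, (pvStep d)^[L] k))).filter (fun p => p.1 != p.2) := by
  intro ks
  induction ks with
  | nil => intro m acc _; simp
  | cons k ks ih =>
    intro m acc hm
    have hout : (pvStep d)^[L + 1] k ∉ d.keys := by
      rw [Function.iterate_succ_apply']
      rw [pvStep_of_not_mem d _ (hnm k)]
      exact hnm k
    obtain ⟨h1, h2, h3⟩ := pvResolveLoop_spec d m L hnm (L + 1) k [] hout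
    set r := pvResolveLoop d m (L + 1) k [] with hr
    have he : m.getD r.1 r.1 = (pvStep d)^[L] k := by
      by_cases hcm : m.contains r.1 = true
      · obtain ⟨v, hv⟩ : ∃ v, m.get? r.1 = some v := by
          rw [PySem.Dict.contains_eq_isSome_get?] at hcm
          exact Option.isSome_iff_exists.1 hcm
        rw [PySem.Dict.getD_of_get?_eq_some m r.1 hv, hm r.1 v hv, h2]
      · have hcm' : m.contains r.1 = false := by simpa using hcm
        have hcd : d.contains r.1 = false := by
          simpa [hcm'] using h1
        have hr1 : r.1 ∉ d.keys := by
          simpa [PySem.Dict.contains_eq_decide_mem_keys] using hcd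
        rw [PySem.Dict.getD_of_not_contains m r.1 hcm', ← h2,
          pvIter_of_not_mem d L r.1 hr1]
    have hAlt : pvAltStep d L (m, acc) k
        = (r.2.foldl (fun mm p => mm.insert p ((pvStep d)^[L] k)) m,
           if k != (pvStep d)^[L] k then acc ++ [(k, (pvStep d)^[L] k)] else acc) := by
      unfold pvAltStep
      simp only [← hr, he]
    have hinv' : pvInv d L (r.2.foldl (fun mm p => mm.insert p ((pvStep d)^[L] k)) m) := by
      apply pvInv_foldl d L _ r.2 m hm
      intro p hp
      rcases h3 p hp with h | h
      · simp at h
      · exact h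
    rw [List.foldl_cons, hAlt, ih _ _ hinv']
    by_cases hk : (k != (pvStep d)^[L] k) = true
    · simp [hk]
    · simp only [Bool.not_eq_true] at hk
      simp [hk]

-- ===== VERDICT (by name: the statement is the Claim_ definition above) =====
theorem collapseChangesChains_spec : Claim_equal_collapseChangesChains := by
  intro changes _ hPre
  unfold Spec_collapseChangesChains
  set d := PySem.Dict.ofList changes with hd
  set L := changes.length with hL
  have hnd : d.keys.Nodup := PySem.Dict.nodup_keys_ofList changes
  have hnm : ∀ x, (pvStep d)^[L] x ∉ d.keys := pvIter_not_mem d L hPre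
  -- A's value
  have hA : collapseChangesChains changes
      = (d.keys.map (fun k => (k, (pvStep d)^[L] k))).filter (fun p => p.1 != p.2) := by
    unfold collapseChangesChains
    rw [← hd, ← hL]
    have hfresh : ∀ a ∈ d.keys, (PySem.Dict.empty : PySem.Dict Int Int).contains a = false := by
      intro a _; simp [PySem.Dict.contains_empty]
    have hitems := PySem.Dict.items_foldl_insert_fresh (l := d.keys)
      (k := fun a => a) (v := fun a => pvWhileA d L (d.getD a a))
      (d := PySem.Dict.empty) hfresh (by simpa using hnd)
    simp only [hitems]
    rw [show (PySem.Dict.empty : PySem.Dict Int Int).items = [] from rfl, List.nil_append]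
    congr 1
    apply List.map_congr_left
    intro a ha
    have : pvWhileA d L (d.getD a a) = (pvStep d)^[L] a := by
      rw [pvWhileA_eq_iter]
      have : d.getD a a = pvStep d a := rfl
      rw [this, pvIter_step d L hPre]
    rw [this]
  -- B's value
  have hB : collapseChangesChains_alt changes
      = (d.keys.map (fun k => (k, (pvStep d)^[L] k))).filter (fun p => p.1 != p.2) := by
    unfold collapseChangesChains_alt
    rw [← hd, ← hL]
    have hinv : pvInv d L PySem.Dict.empty := by
      intro p v hv
      rw [PySem.Dict.get?_empty] at hv
      cases hv
    simpa using pvFold_spec d L hnm d.keys PySem.Dict.empty [] hinv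
  rw [hA, hB]
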